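-- pv_equiv track=rewrite | github.com/cfchou/codeinpy | src/3Sum.py | sort_and_map
-- ===== SOURCE A (Python) =====
-- def sort_and_map(num):
--     sn = sorted(num)
--     cs = []
--     dict = {}
--     for n in sn:
--         t = dict.get(n)
--         if None == t:
--             cs.append(n)
--             dict[n] = 1
--         else:
--             dict[n] = t + 1
--     return cs, dict
-- ===== SOURCE B (Python) =====
-- def sort_and_map(num):
--     counts = {}
--     for n in num:
--         counts[n] = counts.get(n, 0) + 1
--     cs = sorted(counts)
--     return cs, {k: counts[k] for k in cs}
-- ===== Notes on version B (the rewrite author's own statement) =====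
-- stated objective: idiomatic
-- what changed: Counts frequencies in a single pass over the unsorted input, then sorts only the distinct keys and rebuilds the dict in key order, instead of sorting the whole list first and detecting new elements during one pass over the sorted data.
import Mathlib
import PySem

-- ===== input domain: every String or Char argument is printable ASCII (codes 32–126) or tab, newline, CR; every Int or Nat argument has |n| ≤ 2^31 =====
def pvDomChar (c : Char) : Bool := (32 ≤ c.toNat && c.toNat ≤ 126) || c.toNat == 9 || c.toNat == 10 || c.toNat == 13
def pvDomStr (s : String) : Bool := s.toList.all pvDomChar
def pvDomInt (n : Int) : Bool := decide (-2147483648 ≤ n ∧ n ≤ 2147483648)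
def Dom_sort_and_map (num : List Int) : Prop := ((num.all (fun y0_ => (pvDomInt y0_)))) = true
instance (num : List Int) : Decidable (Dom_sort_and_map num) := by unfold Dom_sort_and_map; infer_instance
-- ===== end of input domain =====

-- B counts frequencies over the unsorted input first, then sorts the distinct keys and rebuilds the
-- dict in key order (count-then-sort), instead of A's sort-then-single-pass; proved to return A's exact value.


-- ===== PORT A =====
-- sn = sorted(num); one pass: on a fresh element append to cs and set count 1, else bump the count
def sort_and_map (num : List Int) : List Int × (List (Int × Int)) :=
  let sn := PySem.List.sorted num (fun x => x) false
  let st := sn.foldl (fun (s : List Int × PySem.Dict Int Int) n =>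
      match s.2.get? n with
      | none => (s.1 ++ [n], s.2.insert n 1)
      | some t => (s.1, s.2.insert n (t + 1))) ([], PySem.Dict.empty)
  (st.1, st.2.items)

-- ===== PORT B =====
-- counts[n] = counts.get(n, 0) + 1 over the raw input; cs = sorted(counts); dict rebuilt over cs
-- (counts[k] for k in cs is ported as getD k 0, exact: every k in cs is a key of counts)
def sort_and_map_alt (num : List Int) : List Int × (List (Int × Int)) :=
  let counts := num.foldl (fun (d : PySem.Dict Int Int) n => d.insert n (d.getD n 0 + 1)) PySem.Dict.empty
  let cs := PySem.List.sorted counts.keys (fun x => x) false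
  (cs, (cs.foldl (fun (d : PySem.Dict Int Int) k => d.insert k (counts.getD k 0)) PySem.Dict.empty).items)

-- ===== PRECONDITION & SPEC =====
def Spec_sort_and_map (num : List Int) (out : List Int × (List (Int × Int))) : Prop := out = sort_and_map_alt num
instance (num : List Int) (out : List Int × (List (Int × Int))) : Decidable (Spec_sort_and_map num out) := by unfold Spec_sort_and_map; infer_instance

-- ===== CLAIM (what is proved, stated in full; the proofs are below) =====
def Claim_equal_sort_and_map : Prop := ∀ (num : List Int), Dom_sort_and_map num → Spec_sort_and_map num (sort_and_map num)

-- ===== LEMMAS AND PROOFS =====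

-- A's loop state is (d.keys, d) where d is the insert-getD-counter over the processed prefix
theorem A_loop (l : List Int) (d : PySem.Dict Int Int) :
    l.foldl (fun (s : List Int × PySem.Dict Int Int) n =>
      match s.2.get? n with
      | none => (s.1 ++ [n], s.2.insert n 1)
      | some t => (s.1, s.2.insert n (t + 1))) (d.keys, d)
    = ((l.foldl (fun (d : PySem.Dict Int Int) n => d.insert n (d.getD n 0 + 1)) d).keys,
       l.foldl (fun (d : PySem.Dict Int Int) n => d.insert n (d.getD n 0 + 1)) d) := by
  induction l generalizing d with
  | nil => rfl
  | cons n l ih =>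
    simp only [List.foldl_cons]
    rcases h : d.get? n with _ | t
    all_goals dsimp only
    · have : d.insert n 1 = d.insert n (d.getD n 0 + 1) := by
        simp [PySem.Dict.getD_eq_get?_getD, h]
      rw [this]
      have hk : (d.insert n (d.getD n 0 + 1)).keys = d.keys ++ [n] := by
        apply PySem.Dict.keys_insert_of_not_contains
        simp [PySem.Dict.contains_eq_isSome_get?, h]
      rw [← hk, ih]
    · have : d.insert n (t + 1) = d.insert n (d.getD n 0 + 1) := by
        simp [PySem.Dict.getD_eq_get?_getD, h]
      rw [this]
      have hk : (d.insert n (d.getD n 0 + 1)).keys = d.keys := by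
        apply PySem.Dict.keys_insert_of_contains
        simp [PySem.Dict.contains_eq_isSome_get?, h]
      rw [← hk, ih]

-- the ordered dedup of a list is an (ordered) sublist of it
theorem foldl_add_append (l : List Int) : ∀ s : List Int, ∃ t : List Int,
    l.foldl PySem.Set.add s = s ++ t ∧ t.Sublist l := by
  induction l with
  | nil => exact fun s => ⟨[], by simp⟩
  | cons x l ih =>
    intro s
    by_cases hx : x ∈ s
    · obtain ⟨t, ht, hs⟩ := ih s
      exact ⟨t, by simpa [PySem.Set.add_of_mem hx] using ht, hs.cons x⟩
    · obtain ⟨t, ht, hs⟩ := ih (s ++ [x])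
      exact ⟨x :: t, by simpa [PySem.Set.add_of_not_mem hx] using ht, hs.cons₂ x⟩

theorem ofList_sublist (l : List Int) : (PySem.Set.ofList l).Sublist l := by
  obtain ⟨t, ht, hs⟩ := foldl_add_append l []
  rw [PySem.Set.ofList_eq_foldl, ht]
  simpa using hs

-- the ordered dedup of the sorted list IS sorted(set(num))
theorem dedup_sorted (num : List Int) :
    PySem.Set.ofList (PySem.List.sorted num (fun x => x) false)
      = PySem.List.sorted (PySem.Set.ofList num) (fun x => x) false := by
  set sn := PySem.List.sorted num (fun x => x) false with hsn
  refine (PySem.List.sorted_eq_of_perm_of_pairwise_lt _ _ _ ?_ ?_).symm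
  · rw [List.perm_ext_iff_of_nodup (PySem.Set.nodup_ofList _) (PySem.Set.nodup_ofList _)]
    intro x
    simp [PySem.Set.mem_ofList, hsn, PySem.List.mem_sorted]
  · have hle : sn.Pairwise (fun a b : Int => a ≤ b) := by
      simpa using PySem.List.sorted_pairwise num (fun x => x)
    have h1 : (PySem.Set.ofList sn).Pairwise (fun a b : Int => a ≤ b) :=
      hle.sublist (ofList_sublist sn)
    have h2 : (PySem.Set.ofList sn).Pairwise (fun a b : Int => a ≠ b) :=
      PySem.Set.nodup_ofList _
    exact (h1.and h2).imp (fun h => lt_of_le_of_ne h.1 h.2)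

-- ===== VERDICT (by name: the statement is the Claim_ definition above) =====
theorem sort_and_map_spec : Claim_equal_sort_and_map := by
  intro num _
  unfold Spec_sort_and_map sort_and_map sort_and_map_alt
  have hA := A_loop (PySem.List.sorted num (fun x => x) false) PySem.Dict.empty
  have hkeys0 : (PySem.Dict.empty : PySem.Dict Int Int).keys = [] := rfl
  rw [hkeys0] at hA
  simp only [hA]
  have hcA : (PySem.List.sorted num (fun x => x) false).foldl
      (fun (d : PySem.Dict Int Int) n => d.insert n (d.getD n 0 + 1)) PySem.Dict.empty
      = PySem.Dict.counter (PySem.List.sorted num (fun x => x) false) :=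
    PySem.Dict.foldl_insert_getD_add_one_eq_counter _
  have hcB : num.foldl
      (fun (d : PySem.Dict Int Int) n => d.insert n (d.getD n 0 + 1)) PySem.Dict.empty
      = PySem.Dict.counter num :=
    PySem.Dict.foldl_insert_getD_add_one_eq_counter _
  rw [hcA, hcB, PySem.Dict.keys_counter, PySem.Dict.keys_counter, ← dedup_sorted,
    PySem.Dict.items_counter]
  have hnd : (PySem.Set.ofList (PySem.List.sorted num (fun x => x) false)).Nodup :=
    PySem.Set.nodup_ofList _
  have hfresh := PySem.Dict.items_foldl_insert_fresh
    (l := PySem.Set.ofList (PySem.List.sorted num (fun x => x) false))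
    (k := fun x => x) (v := fun k => (PySem.Dict.counter num).getD k 0)
    (d := PySem.Dict.empty)
    (by intro a _; rfl) (by rw [List.map_id_fun']; exact hnd)
  rw [hfresh]
  simp only [show (PySem.Dict.empty : PySem.Dict Int Int).items = [] from rfl, List.nil_append]
  refine Prod.ext rfl ?_
  apply List.map_congr_left
  intro k hk
  have hcount : (PySem.List.sorted num (fun x => x) false).count k = num.count k :=
    (PySem.List.sorted_perm num (fun x => x) false).count_eq k
  rw [PySem.Dict.getD_counter, hcount]
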